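-- pv_equiv track=rewrite | github.com/KFurudate/Atcoder_SHOJIN | Atcoder/木DP_全方位木DP/D_塗り絵_木DP.py | dfs
-- ===== SOURCE A (Python) =====
-- def dfs(v, root=-1):
--     fx, gx = 1, 1
--     for u in to[v]:
--         if u == root: continue
--         fy, gy = dfs(u, v)
--         fx *= fy + gy
--         gx *= fy
--     return fx, gx
--
-- to = [[4], [4, 3, 2], [1], [1], [1, 0]]
-- ===== SOURCE B (Python) =====
-- def dfs(v, root=-1):
--     # iterative post-order DFS with an explicit stack of frames
--     # frame = [node, parent, next-child-index, fx, gx]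
--     stack = [[v, root, 0, 1, 1]]
--     while True:
--         fr = stack[-1]
--         node, par, i = fr[0], fr[1], fr[2]
--         ch = to[node]
--         if i < len(ch):
--             fr[2] = i + 1
--             u = ch[i]
--             if u != par:
--                 stack.append([u, node, 0, 1, 1])
--         else:
--             stack.pop()
--             if not stack:
--                 return fr[3], fr[4]
--             p = stack[-1]
--             p[3] *= fr[3] + fr[4]
--             p[4] *= fr[3]
--
-- to = [[4], [4, 3, 2], [1], [1], [1, 0]]
-- ===== Notes on version B (the rewrite author's own statement) =====
-- stated objective: alternative
-- what changed: Replaces A's recursive tree DP with an iterative post-order DFS using an explicit stack of (node, parent, child-index, fx, gx) frames, folding each finished frame's products into its parent frame; Pre_ only excludes v outside -5..4, where both raise IndexError on to[v].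
import Mathlib
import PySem

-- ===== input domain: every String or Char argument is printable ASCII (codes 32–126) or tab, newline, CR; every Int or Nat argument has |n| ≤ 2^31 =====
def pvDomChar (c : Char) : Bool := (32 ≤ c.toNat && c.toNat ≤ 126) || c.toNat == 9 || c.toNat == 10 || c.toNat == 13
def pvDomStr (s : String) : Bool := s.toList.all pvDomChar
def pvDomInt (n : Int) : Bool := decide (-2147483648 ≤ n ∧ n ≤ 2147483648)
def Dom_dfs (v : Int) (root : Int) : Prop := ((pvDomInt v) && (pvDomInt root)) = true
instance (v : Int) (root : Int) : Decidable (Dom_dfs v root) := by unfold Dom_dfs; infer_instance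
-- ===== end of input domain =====

-- B replaces A's recursion by an explicit stack of post-order DFS frames (same return value; alternative decomposition, no speed claim).

-- ===== PORT A =====
-- the module-level adjacency list 'to'
def pyTo : List (List Int) := [[4], [4, 3, 2], [1], [1], [1, 0]]

-- recursive dfs; fuel only makes the recursion total (never exhausted on Pre_ inputs, max call depth is 5)
def dfsA : Nat → Int → Int → Int × Int
  | 0, _, _ => (1, 1)
  | fuel+1, v, root =>
    match PySem.List.pyGet? pyTo v with
    | none => (1, 1)      -- IndexError on to[v]; excluded by Pre_dfs
    | some ch =>
      ch.foldl (fun fg u =>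
        if u == root then fg
        else
          let fygy := dfsA fuel u v
          (fg.1 * (fygy.1 + fygy.2), fg.2 * fygy.1)) (1, 1)

def dfs (v : Int) (root : Int) : Int × Int := dfsA 8 v root

-- ===== PORT B =====
-- frame = (node, parent, next-child-index, fx, gx); stack head = Python stack[-1]
-- fuel only makes the while-True loop total (never exhausted on Pre_ inputs, ≤ 43 iterations)
def loopB : Nat → List (Int × Int × Nat × Int × Int) → Int × Int
  | 0, _ => (1, 1)
  | _+1, [] => (1, 1)     -- unreachable: the loop returns before the stack empties
  | fuel+1, (node, par, i, fx, gx) :: rest =>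
    match PySem.List.pyGet? pyTo node with
    | none => (1, 1)      -- IndexError on to[node]; excluded by Pre_dfs
    | some ch =>
      match ch[i]? with
      | some u =>          -- i < len(ch): advance index, maybe push child
        if u == par then loopB fuel ((node, par, i+1, fx, gx) :: rest)
        else loopB fuel ((u, node, 0, 1, 1) :: (node, par, i+1, fx, gx) :: rest)
      | none =>            -- children exhausted: pop, fold into parent or return
        match rest with
        | [] => (fx, gx)
        | (pn, pp, pi, pfx, pgx) :: rs =>
          loopB fuel ((pn, pp, pi, pfx * (fx + gx), pgx * fx) :: rs)

def dfs_alt (v : Int) (root : Int) : Int × Int := loopB 64 [(v, root, 0, 1, 1)]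

-- ===== PRECONDITION & SPEC =====
-- Pre_ excludes exactly the v on which Python's to[v] raises IndexError (len(to) = 5, negative indices wrap)
def Pre_dfs (v : Int) (root : Int) : Prop := -5 ≤ v ∧ v ≤ 4
instance (v : Int) (root : Int) : Decidable (Pre_dfs v root) := by unfold Pre_dfs; infer_instance
def pvWitness_dfs : Int × Int := (1, -1)
def Spec_dfs (v : Int) (root : Int) (out : Int × Int) : Prop := out = dfs_alt v root
instance (v : Int) (root : Int) (out : Int × Int) : Decidable (Spec_dfs v root out) := by unfold Spec_dfs; infer_instance

-- ===== CLAIM (what is proved, stated in full; the proofs are below) =====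
def Claim_equal_dfs : Prop := ∀ (v : Int) (root : Int), Dom_dfs v root → Pre_dfs v root → Spec_dfs v root (dfs v root)

-- ===== LEMMAS AND PROOFS =====

-- every child stored in pyTo lies in {0,1,2,3,4}
lemma mem_pyTo_child {v : Int} {ch : List Int} {u : Int}
    (h : PySem.List.pyGet? pyTo v = some ch) (hu : u ∈ ch) :
    u ∈ ([0, 1, 2, 3, 4] : List Int) := by
  have hch : ch ∈ pyTo := PySem.List.mem_of_pyGet?_eq_some _ h
  have : ∀ l ∈ pyTo, ∀ x ∈ l, x ∈ ([0, 1, 2, 3, 4] : List Int) := by decide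
  exact this ch hch u hu

-- dfsA depends on root only through equality tests against children (all in {0..4})
lemma dfsA_root_congr (fuel : Nat) (v r r' : Int)
    (h : ∀ u ∈ ([0, 1, 2, 3, 4] : List Int), (u == r) = (u == r')) :
    dfsA fuel v r = dfsA fuel v r' := by
  cases fuel with
  | zero => rfl
  | succ f =>
    simp only [dfsA]
    cases hg : PySem.List.pyGet? pyTo v with
    | none => rfl
    | some ch =>
      dsimp only
      refine PySem.List.foldl_congr_mem _ _ _ _ ?_
      intro acc u hu
      rw [h u (mem_pyTo_child hg hu)]

-- loopB with the initial frame at the bottom of the stack: same root-congruence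
lemma loopB_root_congr (fuel : Nat) (st : List (Int × Int × Nat × Int × Int))
    (v r r' : Int) (i : Nat) (fx gx : Int)
    (h : ∀ u ∈ ([0, 1, 2, 3, 4] : List Int), (u == r) = (u == r')) :
    loopB fuel (st ++ [(v, r, i, fx, gx)]) = loopB fuel (st ++ [(v, r', i, fx, gx)]) := by
  induction fuel generalizing st i fx gx with
  | zero => rfl
  | succ f ih =>
    cases st with
    | nil =>
      simp only [List.nil_append, loopB]
      cases hg : PySem.List.pyGet? pyTo v with
      | none => rfl
      | some ch =>
        dsimp only
        cases hu : ch[i]? with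
        | some u =>
          dsimp only
          have hmem : u ∈ ch := List.mem_of_getElem? hu
          rw [show (u == r) = (u == r') from h u (mem_pyTo_child hg hmem)]
          by_cases hur : (u == r') = true
          · simp only [hur, if_true]
            simpa using ih [] (i+1) fx gx
          · simp only [hur, if_false, Bool.false_eq_true]
            simpa using ih [(u, v, 0, 1, 1)] (i+1) fx gx
        | none => rfl
    | cons fr st' =>
      obtain ⟨n, p, j, a, b⟩ := fr
      simp only [List.cons_append, loopB]
      cases hg : PySem.List.pyGet? pyTo n with
      | none => rfl
      | some ch =>
        dsimp only
        cases hu : ch[j]? with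
        | some u =>
          by_cases hup : (u == p) = true
          · simp only [hup, if_true]
            simpa using ih ((n, p, j+1, a, b) :: st') i fx gx
          · simp only [hup, if_false, Bool.false_eq_true]
            simpa using ih ((u, n, 0, 1, 1) :: (n, p, j+1, a, b) :: st') i fx gx
        | none =>
          cases st' with
          | nil =>
            dsimp only [List.nil_append]
            simpa using ih [] i (fx * (a + b)) (gx * a)
          | cons g gs =>
            obtain ⟨pn, pp, pi, pfx, pgx⟩ := g
            dsimp only [List.cons_append]
            simpa using ih ((pn, pp, pi, pfx * (a + b), pgx * a) :: gs) i fx gx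

-- the 60 concrete cases: v in range, root a child value or the canonical non-neighbour -6
lemma big : ∀ v ∈ ([-5, -4, -3, -2, -1, 0, 1, 2, 3, 4] : List Int),
    ∀ r ∈ ([-6, 0, 1, 2, 3, 4] : List Int), dfs v r = dfs_alt v r := by decide

-- ===== VERDICT (by name: the statement is the Claim_ definition above) =====
theorem dfs_spec : Claim_equal_dfs := by
  intro v root _ hpre
  unfold Spec_dfs
  have hv : v ∈ ([-5, -4, -3, -2, -1, 0, 1, 2, 3, 4] : List Int) := by
    obtain ⟨h1, h2⟩ := hpre
    simp only [List.mem_cons]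
    omega
  by_cases hr : root ∈ ([0, 1, 2, 3, 4] : List Int)
  · exact big v hv root (by simp only [List.mem_cons] at hr ⊢; tauto)
  · have hcong : ∀ u ∈ ([0, 1, 2, 3, 4] : List Int), (u == root) = (u == (-6 : Int)) := by
      intro u hu
      have h1 : u ≠ root := fun e => hr (e ▸ hu)
      have h2 : u ≠ (-6 : Int) := by
        have h5 : u = 0 ∨ u = 1 ∨ u = 2 ∨ u = 3 ∨ u = 4 := by simpa using hu
        rcases h5 with h|h|h|h|h <;> simp [h]
      simp [h1, h2]
    have hA : dfs v root = dfs v (-6) := dfsA_root_congr 8 v root (-6) hcong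
    have hB : dfs_alt v root = dfs_alt v (-6) := by
      unfold dfs_alt
      exact loopB_root_congr 64 [] v root (-6) 0 1 1 hcong
    rw [hA, hB]
    exact big v hv (-6) (by decide)
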